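-- pv_equiv track=rewrite | github.com/Vaharis/alignmentfreeTP1 | TP/kmers.py | kmer2str
-- ===== SOURCE A (Python) =====
-- def kmer2str(val, k):
--     """ Transform a kmer integer into its string representation
--     :param int val: An integer representation of a kmer
--     :param int k: The number of nucleotides involved into the kmer.
--     :return str: The kmer string formatted
--     """
--     letters = ['A', 'C', 'T', 'G']
--     str_val = []
--     for _ in range(k):
--         str_val.append(letters[val & 0b11])
--         val >>= 2
--
--     str_val.reverse()
--     return "".join(str_val)
-- ===== SOURCE B (Python) =====
-- def _chunk(rem, k):
--     """String for the k base-4 digits of rem (0 <= rem < 4**k), most significant first."""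
--     if k == 1:
--         return "ACTG"[rem]
--     half = k // 2
--     hi, lo = divmod(rem, 1 << (2 * half))
--     return _chunk(hi, k - half) + _chunk(lo, half)
--
-- def kmer2str(val, k):
--     """ Transform a kmer integer into its string representation """
--     if k <= 0:
--         return ""
--     return _chunk(val & ((1 << (2 * k)) - 1), k)
-- ===== Notes on version B (the rewrite author's own statement) =====
-- stated objective: alternative
-- what changed: A peels the k two-bit codes LSB-first while mutating val, collects them in a list and reverses it; B instead masks the low 2k bits once and recursively splits that value with divmod into high and low halves (divide and conquer), emitting the nucleotides most-significant-first with no reversal.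
import Mathlib
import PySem

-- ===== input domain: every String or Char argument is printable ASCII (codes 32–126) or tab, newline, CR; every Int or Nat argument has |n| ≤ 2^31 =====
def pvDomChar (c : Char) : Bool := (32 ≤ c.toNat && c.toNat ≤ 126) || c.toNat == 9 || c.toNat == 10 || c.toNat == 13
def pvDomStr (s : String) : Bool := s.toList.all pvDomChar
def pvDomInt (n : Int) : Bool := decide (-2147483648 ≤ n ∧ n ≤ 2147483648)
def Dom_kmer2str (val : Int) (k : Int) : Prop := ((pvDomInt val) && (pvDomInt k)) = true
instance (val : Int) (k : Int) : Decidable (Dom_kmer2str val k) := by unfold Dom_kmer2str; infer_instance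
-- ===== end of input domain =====

-- B replaces A's LSB-first mask-and-shift loop (list built backwards, then reversed) by a
-- divide-and-conquer scheme: mask the low 2k bits once, then split the value with divmod
-- into high/low halves recursively, emitting nucleotides MSB-first (objective: alternative).

-- ===== PORT A =====
-- A: for _ in range(k): append letters[val & 3]; val >>= 2; then reverse and join.
def kmer2str (val : Int) (k : Int) : String :=
  let letters : List Char := ['A', 'C', 'T', 'G']
  let st :=
    (PySem.List.pyRange 0 k 1).foldl
      (fun (st : List Char × Int) _ =>
        (st.1 ++ [PySem.List.pyGetD letters (PySem.Int.band st.2 3) '?'], st.2 >>> (2:Nat)))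
      ([], val)
  String.ofList st.1.reverse

-- ===== PORT B =====
-- B-side helper: _chunk(rem, k) — the k base-4 digits of rem, most significant first.
-- (Python tests k == 1; the 'k ≤ 1' test and the fuel argument only make the recursion
-- total/structural — _chunk is only ever called with 1 ≤ k ≤ fuel, where fuel never
-- runs out since k strictly decreases along each recursive call.)
def kmer2strChunk : Nat → Int → Int → List Char
  | 0, rem, _ => [(PySem.Str.pyGet? "ACTG" rem).getD '?']
  | fuel + 1, rem, k =>
    if k ≤ 1 then [(PySem.Str.pyGet? "ACTG" rem).getD '?']
    else
      let p : Int := 1 <<< (2 * PySem.Int.floordiv k 2).toNat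
      kmer2strChunk fuel (PySem.Int.floordiv rem p) (k - PySem.Int.floordiv k 2) ++
        kmer2strChunk fuel (PySem.Int.mod rem p) (PySem.Int.floordiv k 2)

-- B: mask the low 2k bits once, then divide and conquer with divmod.
def kmer2str_alt (val : Int) (k : Int) : String :=
  if k ≤ 0 then "" else
    String.ofList (kmer2strChunk k.toNat (PySem.Int.band val ((1 <<< (2 * k).toNat) - 1)) k)

-- ===== PRECONDITION & SPEC =====
def Spec_kmer2str (val : Int) (k : Int) (out : String) : Prop := out = kmer2str_alt val k
instance (val : Int) (k : Int) (out : String) : Decidable (Spec_kmer2str val k out) := by unfold Spec_kmer2str; infer_instance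

-- ===== CLAIM (what is proved, stated in full; the proofs are below) =====
def Claim_equal_kmer2str : Prop := ∀ (val : Int) (k : Int), Dom_kmer2str val k → Spec_kmer2str val k (kmer2str val k)

-- ===== LEMMAS AND PROOFS =====

-- the letter A picks for the low two bits of v
def pvLetter (v : Int) : Char :=
  PySem.List.pyGetD ['A', 'C', 'T', 'G'] (PySem.Int.band v 3) '?'

-- the letter B picks for a quotient digit q
def pvLetterQ (q : Int) : Char := (PySem.Str.pyGet? "ACTG" q).getD '?'

-- A's loop as a function of the remaining iteration count
def pvLoopA (v : Int) : Nat → List Char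
  | 0 => []
  | n + 1 => pvLetter v :: pvLoopA (v >>> (2:Nat)) n

-- the common canonical value: nucleotides read most-significant-first
def pvListB (v : Int) (n : Nat) : List Char :=
  (List.range n).map (fun j => pvLetter (v >>> (2 * (n - 1 - j))))

theorem pvLoopA_eq_foldl (n : Nat) (a v : Int) (acc : List Char) :
    ((PySem.List.pyRange a (a + n) 1).foldl
      (fun (st : List Char × Int) _ =>
        (st.1 ++ [PySem.List.pyGetD ['A', 'C', 'T', 'G'] (PySem.Int.band st.2 3) '?'], st.2 >>> (2:Nat)))
      (acc, v)).1 = acc ++ pvLoopA v n := by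
  induction n generalizing a v acc with
  | zero => simp [pvLoopA]
  | succ n ih =>
    have h : a + ((n + 1 : Nat) : Int) = (a + 1) + (n : Nat) := by push_cast; ring
    rw [h, PySem.List.pyRange_one_cons (by omega : a < a + 1 + (n:Nat))]
    simp only [List.foldl_cons]
    rw [ih]
    simp [pvLoopA, pvLetter]

theorem pvLoopA_reverse (n : Nat) (v : Int) :
    (pvLoopA v n).reverse = pvListB v n := by
  induction n generalizing v with
  | zero => simp [pvLoopA, pvListB]
  | succ n ih =>
    simp only [pvLoopA, List.reverse_cons, ih]
    unfold pvListB
    rw [List.range_succ, List.map_append]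
    congr 1
    · apply List.map_congr_left
      intro j hj
      rw [List.mem_range] at hj
      have h1 : 2 * (n + 1 - 1 - j) = 2 + 2 * (n - 1 - j) := by omega
      rw [h1, ← Int.shiftRight_add]
    · simp

-- Python's  a & (2^n - 1)  is  a mod 2^n  (also for negative a)
theorem pv_band_mask (a : Int) (n : Nat) :
    PySem.Int.band a ((2:Int)^n - 1) = a % (2:Int)^n := by
  have hp : (0:Int) < 2^n := by positivity
  have hpn : (1:Nat) ≤ 2^n := Nat.one_le_two_pow
  have hcast : ((2:Int)^n) = ((2^n : Nat) : Int) := by push_cast; ring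
  have hm : (0:Int) ≤ 2^n - 1 := by omega
  unfold PySem.Int.band
  by_cases ha : 0 ≤ a
  · rw [if_pos ha, if_pos hm]
    have h1 : ((2:Int)^n - 1).toNat = 2^n - 1 := by omega
    rw [h1, Nat.and_two_pow_sub_one_eq_mod]
    conv_rhs => rw [← Int.toNat_of_nonneg ha, hcast]
    norm_cast
  · rw [if_neg ha, if_pos hm]
    have h1 : ((2:Int)^n - 1).toNat = 2^n - 1 := by omega
    set u : Nat := (-a - 1).toNat with hu
    have hau : a = -(u:Int) - 1 := by omega
    rw [h1, Nat.and_comm, Nat.and_two_pow_sub_one_eq_mod]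
    have hr : u % 2^n < 2^n := Nat.mod_lt _ (by omega)
    -- a % 2^n = 2^n - 1 - (u % 2^n)
    obtain ⟨q, hq⟩ : ∃ q, u = 2^n * q + u % 2^n := ⟨u / 2^n, (Nat.div_add_mod u (2^n)).symm⟩
    have ha2 : a = ((2:Int)^n - 1 - (u % 2^n : Nat)) + (2:Int)^n * (-(q:Int) - 1) := by
      rw [hau]
      have : (u : Int) = (2:Int)^n * q + (u % 2^n : Nat) := by exact_mod_cast congrArg (Nat.cast : Nat → Int) hq
      rw [this]; ring
    have h'r : ((u % 2^n : Nat) : Int) < (2:Int)^n := by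
      rw [hcast]; exact_mod_cast hr
    have h'0 : (0:Int) ≤ ((u % 2^n : Nat) : Int) := by positivity
    have hside1 : (0:Int) ≤ (2:Int)^n - 1 - ((u % 2^n : Nat) : Int) := by omega
    have hside2 : (2:Int)^n - 1 - ((u % 2^n : Nat) : Int) < (2:Int)^n := by omega
    have hle : u % 2^n ≤ 2^n - 1 := by omega
    rw [ha2, Int.add_mul_emod_self_left, Int.emod_eq_of_lt hside1 hside2,
      Nat.cast_sub hle, Nat.cast_sub hpn, ← hcast]
    norm_num

-- arithmetic shift right is floor division by a power of two
theorem pv_shift_div (v : Int) (n : Nat) : v >>> n = v / (2:Int)^n := by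
  rw [Int.shiftRight_eq_div_pow]; push_cast; ring_nf

-- digit-block exchange: (a mod d*e) div d = (a div d) mod e  for d, e > 0
theorem pv_emod_mul_ediv (a d e : Int) (hd : 0 < d) :
    (a % (d * e)) / d = (a / d) % e := by
  have ha : a % (d * e) = a + d * (-(e * (a / (d * e)))) := by rw [Int.emod_def a (d * e)]; ring
  have hdd : a / (d * e) = a / d / e := (Int.ediv_ediv_of_nonneg (le_of_lt hd)).symm
  rw [ha, Int.add_mul_ediv_left _ _ (by omega : d ≠ 0), hdd, Int.emod_def]
  ring

-- splitting the digit string at position l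
theorem pvListB_append (v : Int) (m l : Nat) :
    pvListB v (m + l) = pvListB (v >>> (2 * l)) m ++ pvListB v l := by
  unfold pvListB
  rw [List.range_add, List.map_append, List.map_map]
  congr 1
  · apply List.map_congr_left
    intro j hj
    rw [List.mem_range] at hj
    rw [← Int.shiftRight_add]
    have h1 : 2 * (m + l - 1 - j) = 2 * l + 2 * (m - 1 - j) := by omega
    rw [h1]
  · apply List.map_congr_left
    intro j hj
    rw [List.mem_range] at hj
    simp only [Function.comp_apply]
    have h1 : m + l - 1 - (m + j) = l - 1 - j := by omega
    rw [h1]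

-- the two letter tables pick the same nucleotide
theorem pv_letter_match (x : Int) : pvLetterQ (x % 4) = pvLetter x := by
  have hb : PySem.Int.band x 3 = x % 4 := by
    have := pv_band_mask x 2
    norm_num at this
    exact this
  unfold pvLetter
  rw [hb]
  have h0 : 0 ≤ x % 4 := Int.emod_nonneg x (by omega)
  have h4 : x % 4 < 4 := Int.emod_lt_of_pos x (by omega)
  interval_cases (x % 4) <;> decide

theorem pvChunk_eq : ∀ (f n : Nat) (v : Int), 1 ≤ n → n ≤ f →
    kmer2strChunk f (v % (2:Int)^(2*n)) (n : Int) = pvListB v n := by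
  intro f
  induction f with
  | zero => intro n v hn hnf; omega
  | succ f ih =>
    intro n v hn hnf
    by_cases hone : n = 1
    · subst hone
      simp only [kmer2strChunk]
      rw [if_pos (by norm_num : ((1:Nat):Int) ≤ 1)]
      have h4 : (2:Int)^(2*1) = 4 := by norm_num
      rw [h4]
      show [pvLetterQ (v % 4)] = pvListB v 1
      rw [pv_letter_match]
      unfold pvListB
      simp [List.range_one]
    · have hn2 : 2 ≤ n := by omega
      set h : Nat := n / 2 with hh
      have hfd : PySem.Int.floordiv ((n:Nat):Int) 2 = ((h:Nat):Int) := by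
        exact_mod_cast PySem.Int.floordiv_natCast n 2
      simp only [kmer2strChunk]
      rw [if_neg (by omega : ¬ ((n:Nat):Int) ≤ 1)]
      simp only [hfd]
      have htn : (2 * ((h:Nat):Int)).toNat = 2 * h := by omega
      rw [htn]
      have hp : ((1 <<< (2*h) : Nat) : Int) = (2:Int)^(2*h) := by
        rw [Nat.shiftLeft_eq, one_mul]; push_cast; ring
      have hdpos : (0:Int) < (2:Int)^(2*h) := by positivity
      have hde : (2:Int)^(2*h) * (2:Int)^(2*(n-h)) = (2:Int)^(2*n) := by
        rw [← pow_add]; congr 1; omega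
      have hhi : PySem.Int.floordiv (v % (2:Int)^(2*n)) ((1 <<< (2*h) : Nat) : Int)
          = (v >>> (2*h)) % (2:Int)^(2*(n-h)) := by
        rw [hp, PySem.Int.floordiv_eq_ediv_of_pos hdpos, ← hde,
          pv_emod_mul_ediv v _ _ hdpos, pv_shift_div]
      have hlo : PySem.Int.mod (v % (2:Int)^(2*n)) ((1 <<< (2*h) : Nat) : Int)
          = v % (2:Int)^(2*h) := by
        rw [hp, PySem.Int.mod_eq_emod_of_pos hdpos,
          Int.emod_emod_of_dvd _ (pow_dvd_pow 2 (by omega))]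
      have hcast : ((n:Nat):Int) - ((h:Nat):Int) = (((n - h : Nat)):Int) := by omega
      rw [hhi, hlo, hcast,
        ih (n - h) (v >>> (2*h)) (by omega) (by omega),
        ih h v (by omega) (by omega)]
      rw [show n = (n - h) + h by omega, pvListB_append v (n - h) h]
      congr 2
      omega

-- ===== VERDICT (by name: the statement is the Claim_ definition above) =====
theorem kmer2str_spec : Claim_equal_kmer2str := by
  intro val k _
  unfold Spec_kmer2str kmer2str kmer2str_alt
  by_cases hk : k ≤ 0
  · rw [if_pos hk, PySem.List.pyRange_one_eq_nil hk]
    simp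
  · rw [if_neg hk]
    obtain ⟨m, hm⟩ : ∃ m : Nat, k = ((m:Int) + 1) :=
      ⟨(k - 1).toNat, by omega⟩
    have hk0 : k = (0:Int) + ((m+1 : Nat) : Int) := by push_cast; omega
    simp only []
    rw [hk0, pvLoopA_eq_foldl (m+1) 0 val []]
    rw [List.nil_append, pvLoopA_reverse]
    have e1 : (2 * ((0:Int) + ((m+1 : Nat) : Int))).toNat = 2*(m+1) := by push_cast; omega
    rw [e1]
    have hcast1 : ((1 <<< (2*(m+1)) : Nat) : Int) = (2:Int)^(2*(m+1)) := by
      rw [Nat.shiftLeft_eq, one_mul]; push_cast; ring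
    rw [hcast1, pv_band_mask]
    have e0 : ((0:Int) + ((m+1 : Nat) : Int)).toNat = m+1 := by omega
    rw [e0]
    rw [show (0:Int) + ((m+1 : Nat) : Int) = ((m+1 : Nat) : Int) by ring]
    rw [pvChunk_eq (m+1) (m+1) val (by omega) (by omega)]
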